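-- pv_equiv track=rewrite | github.com/RaghaRao314159/Cryptography-treasure-hunt | stage_4_rsa.py | num_to_text
-- ===== SOURCE A (Python) =====
-- def num_to_text(n):
--     x = str(n)
--     y= []
--     i = 0
--     text = ''
--
--     while i < len(x):
--         y.append(i)
--         if x[i] == "1":
--             i+= 3
--         else:
--             i+= 2
--
--     y.append(len(x))
--
--     for i in range(len(y)-1):
--         text += chr(int(x[y[i]:y[i+1]]))
--
--     return text
-- ===== SOURCE B (Python) =====
-- def num_to_text(n):
--     text = ''
--     buf = ''
--     need = 0
--     for c in str(n):
--         if need == 0: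
--             need = 3 if c == '1' else 2
--         buf += c
--         need -= 1
--         if need == 0:
--             text += chr(int(buf))
--             buf = ''
--     if buf:
--         text += chr(int(buf))
--     return text
-- ===== Notes on version B (the rewrite author's own statement) =====
-- stated objective: alternative
-- what changed: B replaces A's two staged index-based passes (build a boundary list, then slice between consecutive boundaries) with a single character-at-a-time state machine over str(n): a buffer and a remaining-width counter, emitting chr(int(buf)) whenever the buffer fills and flushing the clamped final chunk after the loop; no index list, no slicing.
import Mathlib
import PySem

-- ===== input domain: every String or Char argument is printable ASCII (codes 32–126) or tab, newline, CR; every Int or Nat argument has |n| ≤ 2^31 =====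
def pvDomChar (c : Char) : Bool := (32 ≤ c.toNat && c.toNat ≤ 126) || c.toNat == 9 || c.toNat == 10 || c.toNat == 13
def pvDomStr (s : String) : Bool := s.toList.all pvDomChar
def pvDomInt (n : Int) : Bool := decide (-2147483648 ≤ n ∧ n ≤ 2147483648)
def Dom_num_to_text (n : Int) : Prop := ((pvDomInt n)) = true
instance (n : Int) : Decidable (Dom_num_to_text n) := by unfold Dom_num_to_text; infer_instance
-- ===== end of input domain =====

-- B replaces A's two index-based passes (boundary list, then slicing) with a single
-- character-at-a-time state machine (buffer + remaining-width counter) over str(n):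
-- alternative decomposition, same cost.
-- Pre_ excludes negative arguments, on which Python A raises ValueError (chr of a negative int).


-- ===== PORT A =====
-- chr(int(s)) for a chunk s; int() raising (none) is unreachable under Pre_ (digit chunks only)
def pyChrInt (s : List Char) : Char :=
  match PySem.Int.ofStr? (String.ofList s) with
  | some v => Char.ofNat v.toNat
  | none => Char.ofNat 0

-- A's while loop: collects the chunk start indices (i is Python's loop counter, 0-based, only incremented)
def buildIdx (x : List Char) (i : Nat) : List Nat :=
  if h : i < x.length then
    i :: buildIdx x (i + (if x[i] = '1' then 3 else 2))
  else []
termination_by x.length - i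
decreasing_by split <;> omega

def num_to_text (n : Int) : String :=
  let x := (PySem.Int.toStr n).toList
  let y := buildIdx x 0 ++ [x.length]
  (PySem.List.pyRange 0 ((y.length : Int) - 1) 1).foldl
    (fun text j =>
      text ++ String.ofList [pyChrInt (PySem.List.slice x
        (some ((PySem.List.pyGetD y j 0 : Nat) : Int))
        (some ((PySem.List.pyGetD y (j + 1) 0 : Nat) : Int)))]) ""

-- ===== PORT B =====
-- B's for-loop: a state machine over the characters; state = (buf, need, text);
-- returns the final (text, buf) so the wrapper can run the post-loop `if buf:` flush
def dfaLoop (cs : List Char) (buf : List Char) (need : Nat) (text : String) : String × List Char :=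
  match cs with
  | [] => (text, buf)
  | c :: rest =>
    let need1 := if need = 0 then (if c = '1' then 3 else 2) else need
    let buf1 := buf ++ [c]
    if need1 - 1 = 0 then dfaLoop rest [] 0 (text ++ String.ofList [pyChrInt buf1])
    else dfaLoop rest buf1 (need1 - 1) text

def num_to_text_alt (n : Int) : String :=
  let r := dfaLoop (PySem.Int.toStr n).toList [] 0 ""
  if r.2 ≠ [] then r.1 ++ String.ofList [pyChrInt r.2] else r.1

-- ===== PRECONDITION & SPEC =====
-- Pre_ excludes negative arguments: there str(n) starts with a minus sign, the first chunk
-- parses to a negative int and Python's chr raises ValueError in A (and in B).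
def Pre_num_to_text (n : Int) : Prop := 0 ≤ n
instance (n : Int) : Decidable (Pre_num_to_text n) := by unfold Pre_num_to_text; infer_instance
def pvWitness_num_to_text : Int := 726512
def Spec_num_to_text (n : Int) (out : String) : Prop := out = num_to_text_alt n
instance (n : Int) (out : String) : Decidable (Spec_num_to_text n out) := by unfold Spec_num_to_text; infer_instance

-- ===== CLAIM (what is proved, stated in full; the proofs are below) =====
def Claim_equal_num_to_text : Prop := ∀ (n : Int), Dom_num_to_text n → Pre_num_to_text n → Spec_num_to_text n (num_to_text n)

-- ===== LEMMAS AND PROOFS =====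

-- the character A extracts for a pair of consecutive boundaries
def hpair (x : List Char) (p : Nat × Nat) : Char :=
  pyChrInt (PySem.List.slice x (some (p.1 : Int)) (some (p.2 : Int)))

-- the chunk characters A produces, chunk at a time from position i (characterisation of A)
def scanChars (x : List Char) (i : Nat) : List Char :=
  if h : i < x.length then
    pyChrInt (PySem.List.slice x (some (i : Int))
      (some ((i + (if x[i] = '1' then 3 else 2) : Nat) : Int)))
      :: scanChars x (i + (if x[i] = '1' then 3 else 2))
  else []
termination_by x.length - i
decreasing_by split <;> omega

theorem foldl_str {α : Type} (f : α → Char) :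
    ∀ (z : List α) (t : String),
      z.foldl (fun s p => s ++ String.ofList [f p]) t = t ++ String.ofList (z.map f) := by
  intro z
  induction z with
  | nil => simp
  | cons a r ih =>
    intro t
    simp only [List.foldl_cons, List.map_cons, ih]
    apply String.toList_injective; simp

theorem portA_pairs (x : List Char) (y : List Nat) (hy : y ≠ []) :
    (PySem.List.pyRange 0 ((y.length : Int) - 1) 1).foldl
      (fun text j =>
        text ++ String.ofList [pyChrInt (PySem.List.slice x
          (some ((PySem.List.pyGetD y j 0 : Nat) : Int))
          (some ((PySem.List.pyGetD y (j + 1) 0 : Nat) : Int)))]) ""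
    = String.ofList ((y.zip y.tail).map (hpair x)) := by
  have hylen : 1 ≤ y.length := List.length_pos_of_ne_nil hy
  have hzlen : (y.zip y.tail).length = y.length - 1 := by
    simp [List.length_zip, List.length_tail]
  have h1 : ((y.length : Int) - 1) = ((y.zip y.tail).length : Int) := by
    rw [hzlen]; omega
  rw [h1]
  have e1 : (PySem.List.pyRange 0 (((y.zip y.tail).length : Int)) 1).foldl
      (fun text j =>
        text ++ String.ofList [pyChrInt (PySem.List.slice x
          (some ((PySem.List.pyGetD y j 0 : Nat) : Int))
          (some ((PySem.List.pyGetD y (j + 1) 0 : Nat) : Int)))]) ""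
      = (PySem.List.pyRange 0 (((y.zip y.tail).length : Int)) 1).foldl
      (fun text j =>
        text ++ String.ofList [hpair x (PySem.List.pyGetD (y.zip y.tail) j (0, 0))]) "" := by
    apply PySem.List.foldl_congr_mem
    intro t j hj
    rw [PySem.List.mem_pyRange_one] at hj
    obtain ⟨hj0, hj1⟩ := hj
    have hjz : j < ((y.zip y.tail).length : Int) := hj1
    have hjy : j < (y.length : Int) := by omega
    have hjy1 : j + 1 < (y.length : Int) := by omega
    rw [PySem.List.pyGetD_eq_getElem y 0 hj0 hjy,
        PySem.List.pyGetD_eq_getElem y 0 (by omega) hjy1,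
        PySem.List.pyGetD_eq_getElem (y.zip y.tail) (0, 0) hj0 (by exact_mod_cast hjz)]
    have ht : (j + 1).toNat = j.toNat + 1 := by omega
    have hjn : j.toNat < (y.zip y.tail).length := by omega
    have hjt : j.toNat < y.tail.length := by
      simp [List.length_tail]; omega
    rw [List.getElem_zip, List.getElem_tail]
    simp only [ht]
    rfl
  rw [e1]
  have e2 := PySem.List.foldl_pyRange_pyGetD (y.zip y.tail) ((0 : Nat), (0 : Nat))
      (fun (t : String) (p : Nat × Nat) => t ++ String.ofList [hpair x p]) "" (a := 0) le_rfl
  rw [show PySem.List.len (y.zip y.tail) = (((y.zip y.tail).length : Nat) : Int) from rfl] at e2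
  rw [e2, Int.toNat_zero, List.drop_zero, foldl_str]
  apply String.toList_injective; simp

theorem zip_tail_cons {α β : Type} (f : α × α → β) (a : α) (l : List α) (hl : l ≠ []) :
    (((a :: l).zip (a :: l).tail).map f)
      = f (a, l.headD a) :: ((l.zip l.tail).map f) := by
  cases l with
  | nil => exact absurd rfl hl
  | cons b r => simp [List.zip_cons_cons]

theorem headD_Y (x : List Char) (j : Nat) (d : Nat) :
    (buildIdx x j ++ [x.length]).headD d = if j < x.length then j else x.length := by
  by_cases hj : j < x.length
  · have e : buildIdx x j = j :: buildIdx x (j + (if x[j] = '1' then 3 else 2)) := by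
      rw [buildIdx]; simp [hj]
    rw [e]; simp [hj]
  · have e : buildIdx x j = [] := by rw [buildIdx]; simp [hj]
    rw [e]; simp [hj]

theorem pairs_eq_scan (x : List Char) (i : Nat) :
    (((buildIdx x i ++ [x.length]).zip (buildIdx x i ++ [x.length]).tail).map (hpair x))
      = scanChars x i := by
  induction i using buildIdx.induct x with
  | case1 i h ih =>
    simp only [dite_eq_ite] at ih
    rw [buildIdx, scanChars]
    simp only [dif_pos h, List.cons_append]
    rw [zip_tail_cons (hpair x) i (buildIdx x (i + (if x[i] = '1' then 3 else 2)) ++ [x.length]) (by simp)]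
    rw [ih, headD_Y]
    refine congrArg (fun c => c :: scanChars x (i + (if x[i] = '1' then 3 else 2))) ?_
    have hw2 : 2 ≤ (if x[i] = '1' then 3 else 2) := by split <;> omega
    by_cases h2 : i + (if x[i] = '1' then 3 else 2) < x.length
    · rw [if_pos h2]; rfl
    · rw [if_neg h2]
      show pyChrInt (PySem.List.slice x (some ((i : Nat) : Int)) (some ((x.length : Nat) : Int))) = _
      refine congrArg pyChrInt ?_
      rw [PySem.List.slice_natCast, PySem.List.slice_natCast]
      rw [List.take_of_length_le (by rw [List.length_drop]),
          List.take_of_length_le (by rw [List.length_drop]; omega)]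
  | case2 i h =>
    rw [buildIdx, scanChars]
    simp [h]

-- the chunks the state machine emits, accumulator-free
def dfaChunks (cs : List Char) (buf : List Char) (need : Nat) : List (List Char) :=
  match cs with
  | [] => if buf ≠ [] then [buf] else []
  | c :: rest =>
    let need1 := if need = 0 then (if c = '1' then 3 else 2) else need
    if need1 - 1 = 0 then (buf ++ [c]) :: dfaChunks rest [] 0
    else dfaChunks rest (buf ++ [c]) (need1 - 1)

-- the port (loop + post-loop flush) equals the accumulator-free chunk list
theorem dfaLoop_eq (cs : List Char) :
    ∀ (buf : List Char) (need : Nat) (text : String),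
      (if (dfaLoop cs buf need text).2 ≠ [] then
        (dfaLoop cs buf need text).1 ++ String.ofList [pyChrInt (dfaLoop cs buf need text).2]
       else (dfaLoop cs buf need text).1)
      = text ++ String.ofList ((dfaChunks cs buf need).map pyChrInt) := by
  induction cs with
  | nil =>
    intro buf need text
    by_cases hb : buf = [] <;> simp [dfaLoop, dfaChunks, hb]
  | cons c rest ih =>
    intro buf need text
    rw [dfaLoop, dfaChunks]
    by_cases he : (if need = 0 then (if c = '1' then 3 else 2) else need) - 1 = 0
    · simp only [he, reduceIte, ih, List.map_cons]
      apply String.toList_injective; simp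
    · simp only [if_neg he, ih]

-- consuming `need ≥ 1` more characters into a nonempty buffer emits buf ++ take need,
-- then restarts in the initial state (take/drop clamp exactly like Python slices)
theorem dfaChunks_consume (cs : List Char) :
    ∀ (buf : List Char) (k : Nat), 1 ≤ k → buf ≠ [] →
      dfaChunks cs buf k = (buf ++ cs.take k) :: dfaChunks (cs.drop k) [] 0 := by
  induction cs with
  | nil =>
    intro buf k hk hb
    simp [dfaChunks, hb]
  | cons c rest ih =>
    intro buf k hk hb
    rw [dfaChunks]
    have hk0 : k ≠ 0 := by omega
    simp only [if_neg hk0]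
    by_cases h1 : k = 1
    · subst h1
      simp
    · have hk1 : 1 ≤ k - 1 := by omega
      rw [if_neg (by omega), ih (buf ++ [c]) (k - 1) hk1 (by simp)]
      have hks : k = (k - 1) + 1 := by omega
      rw [hks]
      simp [List.take_succ_cons, List.drop_succ_cons]

-- from the initial state, the machine emits exactly A's chunk characters
theorem dfaChunks_eq_scan (x : List Char) (i : Nat) :
    (dfaChunks (x.drop i) [] 0).map pyChrInt = scanChars x i := by
  induction i using scanChars.induct x with
  | case1 i h ih =>
    simp only [dite_eq_ite] at ih
    rw [scanChars]
    simp only [dif_pos h]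
    have hdrop : x.drop i = x[i] :: x.drop (i + 1) := List.drop_eq_getElem_cons h
    rw [hdrop, dfaChunks]
    simp only [List.nil_append, reduceIte]
    set w : Nat := if x[i] = '1' then 3 else 2 with hw
    have hw2 : 2 ≤ w := by rw [hw]; split <;> omega
    rw [if_neg (show ¬(w - 1 = 0) by omega),
        dfaChunks_consume (x.drop (i + 1)) [x[i]] (w - 1) (by omega) (by simp)]
    rw [List.map_cons]
    have hdw : (x.drop (i + 1)).drop (w - 1) = x.drop (i + w) := by
      rw [List.drop_drop]; congr 1; omega
    rw [hdw, ih]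
    refine congrArg (fun c => c :: scanChars x (i + w)) ?_
    refine congrArg pyChrInt ?_
    rw [PySem.List.slice_natCast]
    have : (i + w) - i = w := by omega
    rw [this, hdrop]
    have hws : w = (w - 1) + 1 := by omega
    rw [hws, List.take_succ_cons]
    simp
  | case2 i h =>
    rw [scanChars]
    have : x.drop i = [] := List.drop_eq_nil_of_le (by omega)
    simp [this, dfaChunks, h]

-- ===== VERDICT (by name: the statement is the Claim_ definition above) =====
theorem num_to_text_spec : Claim_equal_num_to_text := by
  intro n _ _
  show _ = _
  rw [num_to_text, num_to_text_alt, portA_pairs _ _ (by simp [List.append_eq_nil_iff]),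
      pairs_eq_scan]
  rw [show (dfaLoop (PySem.Int.toStr n).toList [] 0 "") = dfaLoop ((PySem.Int.toStr n).toList.drop 0) [] 0 "" by rw [List.drop_zero]]
  rw [dfaLoop_eq, dfaChunks_eq_scan]
  simp
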